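-- pv_equiv track=rewrite | github.com/billyli0313/CS515 | musicrecplus.py | drop_matches
-- ===== SOURCE A (Python) =====
-- def drop_matches(L1, L2):
--     """Returns a new list containing only the elements from list 2 that do not appear in list 1"""
--     L1.sort()
--     L2.sort()
--     i = j = 0
--     result = []
--     while i < len(L1) and j < len(L2):
--         if L1[i] == L2[j]:
--             i += 1
--             j += 1
--         elif L1[i] < L2[j]:
--             i += 1
--         else:
--             result.append(L2[j])
--             j += 1
--     while j < len(L2):
--         result.append(L2[j])
--         j += 1
--     return result
-- ===== SOURCE B (Python) =====
-- def drop_matches(L1, L2):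
--     """Returns a new list containing only the elements from list 2 that do not appear in list 1"""
--     L1.sort()
--     L2.sort()
--     counts = {}
--     for x in L1:
--         counts[x] = counts.get(x, 0) + 1
--     result = []
--     for x in L2:
--         c = counts.get(x, 0)
--         if c > 0:
--             counts[x] = c - 1
--         else:
--             result.append(x)
--     return result
-- ===== Notes on version B (the rewrite author's own statement) =====
-- stated objective: alternative
-- what changed: Replaces the two-pointer sorted-merge multiset difference with a hash-count pass: build a count dict from L1, then keep each sorted L2 element whose remaining count is zero; both versions still sort L1 and L2 in place.
import Mathlib
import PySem

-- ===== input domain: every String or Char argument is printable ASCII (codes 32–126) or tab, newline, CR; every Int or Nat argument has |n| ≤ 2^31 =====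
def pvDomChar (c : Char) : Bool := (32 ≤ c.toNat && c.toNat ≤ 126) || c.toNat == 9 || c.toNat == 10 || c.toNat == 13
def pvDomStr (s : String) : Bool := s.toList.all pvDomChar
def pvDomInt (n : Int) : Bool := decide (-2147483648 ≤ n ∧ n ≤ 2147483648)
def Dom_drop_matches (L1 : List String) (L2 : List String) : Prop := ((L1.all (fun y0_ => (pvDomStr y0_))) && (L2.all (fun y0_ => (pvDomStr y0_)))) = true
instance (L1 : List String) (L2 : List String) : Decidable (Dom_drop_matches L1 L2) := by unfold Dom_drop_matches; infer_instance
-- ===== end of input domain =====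

-- B replaces the two-pointer sorted-merge with a count-dict pass over sorted L2 (alternative
-- decomposition, same cost). Both Pythons sort L1 and L2 in place; the equivalence proved here
-- is about the RETURN value (the in-place sorting side effect is identical in A and B).

-- ===== PORT A =====
-- the two-pointer merge loop of A, as structural recursion over the two sorted lists
def mergeDropA : List String → List String → List String
  | [], l2 => l2
  | _ :: _, [] => []
  | a :: as, b :: bs =>
    if a == b then mergeDropA as bs
    else if a < b then mergeDropA as (b :: bs)
    else b :: mergeDropA (a :: as) bs
  termination_by l1 l2 => (l1.length, l2.length)

def drop_matches (L1 : List String) (L2 : List String) : List String :=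
  mergeDropA (PySem.List.sorted L1 (fun x => x) false) (PySem.List.sorted L2 (fun x => x) false)

-- ===== PORT B =====
def drop_matches_alt (L1 : List String) (L2 : List String) : List String :=
  let s1 := PySem.List.sorted L1 (fun x => x) false
  let s2 := PySem.List.sorted L2 (fun x => x) false
  let counts := s1.foldl (fun (d : PySem.Dict String Int) x => d.insert x (d.getD x 0 + 1)) PySem.Dict.empty
  (s2.foldl (fun (st : PySem.Dict String Int × List String) x =>
      let c := st.1.getD x 0
      if c > 0 then (st.1.insert x (c - 1), st.2) else (st.1, st.2 ++ [x]))
    (counts, [])).2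

-- ===== PRECONDITION & SPEC =====
def Spec_drop_matches (L1 : List String) (L2 : List String) (out : List String) : Prop := out = drop_matches_alt L1 L2
instance (L1 : List String) (L2 : List String) (out : List String) : Decidable (Spec_drop_matches L1 L2 out) := by unfold Spec_drop_matches; infer_instance

-- ===== CLAIM (what is proved, stated in full; the proofs are below) =====
def Claim_equal_drop_matches : Prop := ∀ (L1 : List String) (L2 : List String), Dom_drop_matches L1 L2 → Spec_drop_matches L1 L2 (drop_matches L1 L2)

-- ===== LEMMAS AND PROOFS =====

-- abbreviation for B's second fold step
def altStep (st : PySem.Dict String Int × List String) (x : String) : PySem.Dict String Int × List String :=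
  let c := st.1.getD x 0
  if c > 0 then (st.1.insert x (c - 1), st.2) else (st.1, st.2 ++ [x])

-- when every remaining count is 0, the fold appends every element
lemma foldl_altStep_zero (l : List String) (d : PySem.Dict String Int) (acc : List String)
    (h : ∀ x ∈ l, d.getD x 0 = 0) : (l.foldl altStep (d, acc)).2 = acc ++ l := by
  induction l generalizing acc with
  | nil => simp
  | cons b bs ih =>
    have hb : d.getD b 0 = 0 := h b (by simp)
    simp only [List.foldl_cons, altStep, hb]
    rw [if_neg (by omega)]
    rw [ih (acc ++ [b]) (fun x hx => h x (List.mem_cons_of_mem b hx))]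
    simp

lemma count_cons_ne (a x : String) (l : List String) (h : x ≠ a) :
    (a :: l).count x = l.count x := by
  simp [Ne.symm h]

-- main invariant: if d agrees with the multiset counts of s1 on every element of s2,
-- B's fold over s2 produces acc ++ (A's merge of s1 and s2), for sorted s1 and s2
lemma merge_eq_count (s1 s2 : List String) : ∀ (d : PySem.Dict String Int) (acc : List String),
    s1.Pairwise (· ≤ ·) → s2.Pairwise (· ≤ ·) →
    (∀ x ∈ s2, d.getD x 0 = (s1.count x : Int)) →
    (s2.foldl altStep (d, acc)).2 = acc ++ mergeDropA s1 s2 := by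
  induction s1, s2 using mergeDropA.induct with
  | case1 l2 =>
    intro d acc _ _ hd
    rw [mergeDropA]
    exact foldl_altStep_zero l2 d acc (by simpa using hd)
  | case2 a as =>
    intro d acc _ _ _
    rw [mergeDropA]; simp
  | case3 a as b bs heq ih =>
    intro d acc h1 h2 hd
    have hab : a = b := by simpa using heq
    subst hab
    have hb : d.getD a 0 = ((a :: as).count a : Int) := hd a (by simp)
    have hcnt : (a :: as).count a = as.count a + 1 := by simp
    rw [mergeDropA, if_pos heq]
    simp only [List.foldl_cons, altStep, hb]
    rw [if_pos (by rw [hcnt]; push_cast; omega)]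
    exact ih (d.insert a (((a :: as).count a : Int) - 1)) acc
      (List.Pairwise.of_cons h1) (List.Pairwise.of_cons h2)
      (by
        intro x hx
        rw [PySem.Dict.getD_insert]
        by_cases hxa : x = a
        · subst hxa; rw [if_pos rfl, hcnt]; push_cast; omega
        · rw [if_neg hxa, hd x (by simp [hx]), count_cons_ne a x as hxa])
  | case4 a as b bs heq hlt ih =>
    intro d acc h1 h2 hd
    rw [mergeDropA, if_neg heq, if_pos hlt]
    refine ih d acc (List.Pairwise.of_cons h1) h2 ?_
    intro x hx
    have hbx : b ≤ x := by
      rcases (List.mem_cons.mp hx) with h | h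
      · exact le_of_eq h.symm
      · exact (List.pairwise_cons.mp h2).1 x h
    have hxa : x ≠ a := fun h => by rw [h] at hbx; exact absurd (lt_of_lt_of_le hlt hbx) (lt_irrefl a)
    rw [hd x hx, count_cons_ne a x as hxa]
  | case5 a as b bs heq hnlt ih =>
    intro d acc h1 h2 hd
    have hba : b < a := by
      rcases lt_trichotomy a b with h | h | h
      · exact absurd h hnlt
      · exact absurd (by simp [h]) heq
      · exact h
    have hcnt : (a :: as).count b = 0 := by
      rw [List.count_eq_zero]
      intro hmem
      have : a ≤ b := by
        rcases List.mem_cons.mp hmem with h | h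
        · exact le_of_eq h.symm
        · exact (List.pairwise_cons.mp h1).1 b h
      exact absurd (lt_of_lt_of_le hba this) (lt_irrefl b)
    rw [mergeDropA, if_neg heq, if_neg hnlt]
    simp only [List.foldl_cons, altStep, hd b (by simp), hcnt]
    rw [if_neg (by norm_num)]
    rw [ih d (acc ++ [b]) h1 (List.Pairwise.of_cons h2) (fun x hx => hd x (by simp [hx]))]
    simp

-- ===== VERDICT (by name: the statement is the Claim_ definition above) =====
theorem drop_matches_spec : Claim_equal_drop_matches := by
  intro L1 L2 _
  unfold Spec_drop_matches
  have halt : drop_matches_alt L1 L2 =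
      ((PySem.List.sorted L2 (fun x => x) false).foldl altStep
        (PySem.Dict.counter (PySem.List.sorted L1 (fun x => x) false), ([] : List String))).2 := rfl
  rw [halt, merge_eq_count (PySem.List.sorted L1 (fun x => x) false)
        (PySem.List.sorted L2 (fun x => x) false)
        _ [] (by simpa using PySem.List.sorted_pairwise L1 (fun x => x))
        (by simpa using PySem.List.sorted_pairwise L2 (fun x => x))
        (fun x _ => PySem.Dict.getD_counter _ x)]
  simp [drop_matches]
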